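-- pv_equiv track=rewrite | github.com/keversmithd/VsCode | OTF EXTRACT/sources/import re.py | importpref
-- ===== SOURCE A (Python) =====
-- def importpref(prototype, prefix):
--     n = ""
--     c = False
--     for i in range(len(prototype)):
--         if(prototype[i] == ' ' and c == False):
--             n += " " + prefix + "::"
--             c = True
--         else:
--             n += prototype[i]
--     return n
-- ===== SOURCE B (Python) =====
-- def importpref(prototype, prefix):
--     idx = prototype.find(' ')
--     if idx == -1:
--         return prototype
--     return prototype[:idx] + ' ' + prefix + '::' + prototype[idx + 1:]
-- ===== Notes on version B (the rewrite author's own statement) =====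
-- stated objective: simpler
-- what changed: Replaces the character-by-character loop with a replaced-flag (quadratic repeated string concatenation) by a single find(' ') plus slice concatenation (unchanged string when no space exists).
import Mathlib
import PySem

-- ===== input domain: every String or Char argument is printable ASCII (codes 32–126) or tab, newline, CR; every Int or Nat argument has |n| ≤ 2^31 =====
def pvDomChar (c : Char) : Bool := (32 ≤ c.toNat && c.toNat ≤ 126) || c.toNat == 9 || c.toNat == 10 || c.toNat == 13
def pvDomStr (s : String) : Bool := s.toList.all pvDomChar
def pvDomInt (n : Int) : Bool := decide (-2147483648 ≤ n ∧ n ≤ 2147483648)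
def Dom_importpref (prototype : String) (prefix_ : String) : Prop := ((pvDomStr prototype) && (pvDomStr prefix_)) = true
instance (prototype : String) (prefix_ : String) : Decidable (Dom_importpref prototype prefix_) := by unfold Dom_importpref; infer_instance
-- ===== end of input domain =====

-- B replaces A's char-by-char loop with a replaced-flag by find(' ') + slice concatenation (simpler).

-- ===== PORT A =====
-- the loop body: append the inserted text on the first space, otherwise copy the character
def importprefGo (prefix_ : String) (acc : List Char × Bool) (ch : Char) : List Char × Bool :=
  if ch = ' ' ∧ acc.2 = false then (acc.1 ++ ' ' :: prefix_.toList ++ [':', ':'], true)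
  else (acc.1 ++ [ch], acc.2)

def importpref (prototype : String) (prefix_ : String) : String :=
  String.ofList ((prototype.toList.foldl (importprefGo prefix_) ([], false)).1)

-- ===== PORT B =====
-- Source B: idx = prototype.find(' '); if idx == -1 return prototype;
-- else prototype[:idx] + ' ' + prefix + '::' + prototype[idx+1:] (slices via PySem.List.slice on code points)
def importpref_alt (prototype : String) (prefix_ : String) : String :=
  let idx := PySem.Str.find prototype " "
  if idx = -1 then prototype
  else String.ofList (PySem.List.slice prototype.toList none (some idx) ++
        ' ' :: prefix_.toList ++ ':' :: ':' ::
        PySem.List.slice prototype.toList (some (idx + 1)) none)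

-- ===== PRECONDITION & SPEC =====
def Spec_importpref (prototype : String) (prefix_ : String) (out : String) : Prop := out = importpref_alt prototype prefix_
instance (prototype : String) (prefix_ : String) (out : String) : Decidable (Spec_importpref prototype prefix_ out) := by unfold Spec_importpref; infer_instance

-- ===== CLAIM (what is proved, stated in full; the proofs are below) =====
def Claim_equal_importpref : Prop := ∀ (prototype : String) (prefix_ : String), Dom_importpref prototype prefix_ → Spec_importpref prototype prefix_ (importpref prototype prefix_)

-- ===== LEMMAS AND PROOFS =====

-- once the flag is true, the loop just copies the rest
lemma fold_true (prefix_ : String) (l acc : List Char) :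
    l.foldl (importprefGo prefix_) (acc, true) = (acc ++ l, true) := by
  induction l generalizing acc with
  | nil => simp
  | cons ch t ih => simp [importprefGo, ih]

-- with no space and the flag false, the loop copies everything and keeps the flag false
lemma fold_false_no_space (prefix_ : String) (l acc : List Char) (h : ' ' ∉ l) :
    l.foldl (importprefGo prefix_) (acc, false) = (acc ++ l, false) := by
  induction l generalizing acc with
  | nil => simp
  | cons ch t ih =>
    simp only [List.mem_cons, not_or] at h
    simp [importprefGo, Ne.symm h.1, ih _ h.2]

-- first-occurrence split of a list around a member
lemma exists_first_split {α : Type} [DecidableEq α] (a : α) (l : List α) (h : a ∈ l) :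
    ∃ t r, l = t ++ a :: r ∧ a ∉ t := by
  induction l with
  | nil => cases h
  | cons b t ih =>
    by_cases hb : b = a
    · exact ⟨[], t, by simp [hb]⟩
    · have : a ∈ t := by
        rcases List.mem_cons.mp h with h' | h'
        · exact absurd h'.symm hb
        · exact h'
      obtain ⟨u, r, hur, hnu⟩ := ih this
      exact ⟨b :: u, r, by simp [hur], by simp [hnu]; exact fun e => hb e.symm⟩

-- a singleton is an infix iff its element is a member
lemma singleton_infix_iff {α : Type} (a : α) (l : List α) : [a] <:+: l ↔ a ∈ l := by
  constructor
  · intro h; exact h.sublist.subset (by simp)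
  · intro h
    obtain ⟨s, t, hst⟩ := List.append_of_mem h
    exact ⟨s, t, by simp [hst]⟩

-- find points at the length of the space-free prefix
lemma find_space_eq (t r : List Char) (hnt : ' ' ∉ t) :
    PySem.Chars.find (t ++ ' ' :: r) [' '] = (t.length : Int) := by
  set l := t ++ ' ' :: r with hl
  have hmem : ' ' ∈ l := by simp [hl]
  have hnn : 0 ≤ PySem.Chars.find l [' '] :=
    (PySem.Chars.find_nonneg_iff l [' ']).mpr ((singleton_infix_iff ' ' l).mpr hmem)
  obtain ⟨hpre, hmin⟩ := PySem.Chars.find_spec hnn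
  set k := (PySem.Chars.find l [' ']).toNat with hk
  have hkt : k = t.length := by
    by_contra hne
    rcases Nat.lt_or_ge k t.length with hlt | hge
    · -- prefix at k would put a space inside t
      obtain ⟨s, hs⟩ := hpre
      have hdrop : l.drop k = t.drop k ++ ' ' :: r := by
        simp [hl, List.drop_append_of_le_length (Nat.le_of_lt hlt)]
      have htk : t.drop k = t[k] :: t.drop (k + 1) := List.drop_eq_getElem_cons hlt
      have : t[k] = ' ' := by
        have h2 := hs
        rw [hdrop, htk] at h2
        have := congrArg (fun x => x.head?) h2
        simpa [List.getElem?_eq_getElem hlt] using this.symm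
      exact hnt (this ▸ List.getElem_mem hlt)
    · have hgt : t.length < k := lt_of_le_of_ne hge (fun e => hne e.symm)
      have : ¬ [' '] <+: l.drop t.length := hmin t.length hgt
      exact this (by simp [hl])
  omega

-- ===== VERDICT (by name: the statement is the Claim_ definition above) =====
theorem importpref_spec : Claim_equal_importpref := by
  intro prototype prefix_ _
  unfold Spec_importpref importpref importpref_alt
  by_cases hmem : ' ' ∈ prototype.toList
  · obtain ⟨t, r, hl, hnt⟩ := exists_first_split ' ' prototype.toList hmem
    have hfind : PySem.Str.find prototype " " = (t.length : Int) := by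
      rw [PySem.Str.find_eq]
      simpa [hl] using find_space_eq t r hnt
    have hfold :
        (prototype.toList.foldl (importprefGo prefix_) ([], false)).1
          = t ++ ' ' :: prefix_.toList ++ ':' :: ':' :: r := by
      rw [hl, List.foldl_append, fold_false_no_space prefix_ t [] hnt]
      simp [List.foldl_cons, importprefGo, fold_true]
    rw [hfind]
    have hne : (t.length : Int) ≠ -1 := by omega
    simp only [hne, if_false, hfold]
    have h1 : PySem.List.slice prototype.toList none (some (t.length : Int)) = t := by
      rw [hl, PySem.List.slice_to _ (by positivity)]
      simp
    have h2 : PySem.List.slice prototype.toList (some ((t.length : Int) + 1)) none = r := by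
      rw [hl, PySem.List.slice_from _ (by positivity)]
      have : ((t.length : Int) + 1).toNat = t.length + 1 := by omega
      rw [this]
      rw [show t.length + 1 = t.length + 1 from rfl, ← List.drop_drop]
      simp
    rw [h1, h2]
  · have hfind : PySem.Str.find prototype " " = -1 := by
      rw [PySem.Str.find_eq]
      exact (PySem.Chars.find_eq_neg_one_iff _ _).mpr
        (fun h => hmem ((singleton_infix_iff ' ' prototype.toList).mp (by simpa using h)))
    rw [hfind]
    simp [fold_false_no_space prefix_ prototype.toList [] hmem, String.ofList_toList]
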